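-- pv_equiv track=rewrite | github.com/highwayns/vibesdk | docs/excel_to_markdown.py | clean_header_row
-- ===== SOURCE A (Python) =====
-- from typing import Any, Dict, Iterable, List, Optional, Sequence, Tuple
--
-- def clean_header_row(row: List[str]) -> List[str]:
--     cleaned: List[str] = []
--     prev = None
--     for v in row:
--         if v == prev and v != "":
--             cleaned.append("")
--         else:
--             cleaned.append(v)
--             prev = v
--     return cleaned
-- ===== SOURCE B (Python) =====
-- from itertools import groupby
--
-- def clean_header_row(row):
--     cleaned = []
--     for key, grp in groupby(row):
--         n = sum(1 for _ in grp)
--         cleaned.append(key)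
--         cleaned.extend([""] * (n - 1))
--     return cleaned
-- ===== Notes on version B (the rewrite author's own statement) =====
-- stated objective: alternative
-- what changed: Replaced A's element-by-element scan with a prev sentinel by an itertools.groupby pass that collapses the row into maximal runs of equal cells and emits each run as its key followed by n-1 empty strings.
import Mathlib
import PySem

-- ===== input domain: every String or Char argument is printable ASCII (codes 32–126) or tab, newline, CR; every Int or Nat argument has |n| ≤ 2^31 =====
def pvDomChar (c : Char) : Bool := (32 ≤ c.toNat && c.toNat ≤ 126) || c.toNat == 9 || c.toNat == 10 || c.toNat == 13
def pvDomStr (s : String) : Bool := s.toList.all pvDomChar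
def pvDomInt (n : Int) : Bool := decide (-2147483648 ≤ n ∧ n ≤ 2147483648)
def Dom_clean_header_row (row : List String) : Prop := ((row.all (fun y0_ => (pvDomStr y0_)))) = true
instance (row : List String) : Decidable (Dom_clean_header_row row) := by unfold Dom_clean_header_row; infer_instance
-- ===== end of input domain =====

-- B replaces A's per-element prev-sentinel scan with a run-grouping pass (itertools.groupby):
-- each maximal run of equal cells is emitted as its key followed by blanks; objective: alternative decomposition.


-- ===== PORT A =====
-- cleaned accumulates via append; prev : Option String (None at start)
def clean_header_row (row : List String) : List String :=
  (row.foldl (fun (s : List String × Option String) v =>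
      if some v = s.2 ∧ v ≠ "" then (s.1 ++ [""], s.2)
      else (s.1 ++ [v], some v)) ([], none)).1

-- ===== PORT B =====
-- groupby: peel off the maximal run of the head value, emit key then n-1 blanks, recurse on the rest
def clean_header_row_alt : List String → List String
  | [] => []
  | x :: t =>
      (x :: List.replicate (t.takeWhile (· == x)).length "")
        ++ clean_header_row_alt (t.dropWhile (· == x))
termination_by row => row.length
decreasing_by
  simp only [List.length_cons]
  exact Nat.lt_succ_of_le (t.length_dropWhile_le _)

-- ===== PRECONDITION & SPEC =====
def Spec_clean_header_row (row : List String) (out : List String) : Prop := out = clean_header_row_alt row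
instance (row : List String) (out : List String) : Decidable (Spec_clean_header_row row out) := by unfold Spec_clean_header_row; infer_instance

-- ===== CLAIM (what is proved, stated in full; the proofs are below) =====
def Claim_equal_clean_header_row : Prop := ∀ (row : List String), Dom_clean_header_row row → Spec_clean_header_row row (clean_header_row row)

-- ===== LEMMAS AND PROOFS =====

-- the head of dropWhile p does not satisfy p
theorem head?_dropWhile_not {α : Type} (p : α → Bool) :
    ∀ (l : List α) (y : α), (l.dropWhile p).head? = some y → p y = false := by
  intro l
  induction l with
  | nil => intro y h; cases h
  | cons a t ih =>
      intro y h
      by_cases ha : p a = true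
      · rw [List.dropWhile_cons_of_pos ha] at h; exact ih y h
      · rw [List.dropWhile_cons_of_neg ha] at h
        cases h; simpa using ha

-- recursive characterisation of A's loop body (prev threaded explicitly)
def cleanAux (p : Option String) : List String → List String
  | [] => []
  | v :: t => if some v = p ∧ v ≠ "" then "" :: cleanAux p t else v :: cleanAux (some v) t

theorem clean_fold_eq (row : List String) : ∀ (acc : List String) (p : Option String),
    (row.foldl (fun (s : List String × Option String) v =>
      if some v = s.2 ∧ v ≠ "" then (s.1 ++ [""], s.2)
      else (s.1 ++ [v], some v)) (acc, p)).1 = acc ++ cleanAux p row := by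
  induction row with
  | nil => intro acc p; simp [cleanAux]
  | cons v t ih =>
      intro acc p
      simp only [List.foldl, cleanAux]
      by_cases h : some v = p ∧ v ≠ "" <;> simp [h, ih]

-- a run of elements equal to x turns into blanks under prev = some x (for x = "" via the else branch)
theorem cleanAux_run (t : List String) (x : String) :
    cleanAux (some x) t
      = List.replicate (t.takeWhile (· == x)).length "" ++ cleanAux (some x) (t.dropWhile (· == x)) := by
  induction t with
  | nil => simp
  | cons v t ih =>
      by_cases hv : v = x
      · subst hv
        by_cases hx : v = ""
        · subst hx
          simp only [cleanAux, List.takeWhile, List.dropWhile]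
          simp [ih, List.replicate_succ]
        · simp only [cleanAux, List.takeWhile, List.dropWhile]
          simp [hx, ih, List.replicate_succ]
      · have h : (v == x) = false := by simpa using hv
        simp [List.takeWhile, List.dropWhile, h]

theorem cleanAux_eq_alt : ∀ (n : Nat) (row : List String) (p : Option String),
    row.length ≤ n → (∀ x, row.head? = some x → p ≠ some x) →
    cleanAux p row = clean_header_row_alt row := by
  intro n
  induction n with
  | zero =>
      intro row p hn _
      have : row = [] := List.eq_nil_of_length_eq_zero (Nat.le_zero.mp hn)
      subst this; simp [cleanAux, clean_header_row_alt]
  | succ n ih =>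
      intro row p hn hp
      cases row with
      | nil => simp [cleanAux, clean_header_row_alt]
      | cons x t =>
          have hpx : p ≠ some x := hp x rfl
          have hcond : ¬ (some x = p ∧ x ≠ "") := by
            intro ⟨h1, _⟩; exact hpx h1.symm
          have hrest : cleanAux (some x) (t.dropWhile (· == x))
              = clean_header_row_alt (t.dropWhile (· == x)) := by
            apply ih
            · exact Nat.le_trans (t.length_dropWhile_le _) (Nat.le_of_succ_le_succ hn)
            · intro y hy h
              have hne := head?_dropWhile_not (· == x) t y hy
              injection h with h
              exact (by simpa using hne : y ≠ x) h.symm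
          simp only [cleanAux, if_neg hcond]
          rw [cleanAux_run, hrest, clean_header_row_alt]
          simp

-- ===== VERDICT (by name: the statement is the Claim_ definition above) =====
theorem clean_header_row_spec : Claim_equal_clean_header_row := by
  intro row _
  show clean_header_row row = clean_header_row_alt row
  rw [clean_header_row, clean_fold_eq row [] none]
  simpa using cleanAux_eq_alt row.length row none (Nat.le_refl _)
    (by intro x _ h; simp at h)
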